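-- pv_equiv track=rewrite | github.com/Mohiiit/python-madara | recover.py | ifft
-- ===== SOURCE A (Python) =====
-- P = 0x73eda753299d7d483339d80809a1d80553bda402fffe5bfeffffffff00000001
--
-- def ifft(arr, xs):
--     if len(arr) == 1:
--         return arr
--     n = len(arr) // 2
--     res0 = []
--     res1 = []
--     new_xs = []
--     for i in range(0, 2 * n, 2):
--         a = arr[i]
--         b = arr[i + 1]
--         x = xs[i]
--         res0.append(div_mod(a + b, 2, P))
--         res1.append(div_mod(a - b, 2 * x, P))
--         new_xs.append(pow(x, 2, P))
--     return sum(zip(ifft(res0, new_xs), ifft(res1, new_xs)), ())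
--
-- def div_mod(a, b, P):
--     return (a * pow(b, P - 2, P)) % P
-- ===== SOURCE B (Python) =====
-- P = 0x73eda753299d7d483339d80809a1d80553bda402fffe5bfeffffffff00000001
--
-- def ifft(arr, xs):
--     # Iterative breadth-first version: instead of recursing, keep the list of all
--     # subproblems of the current level (they all share one xs vector), split every
--     # one of them per level, and at the end read the size-1 leaves back through the
--     # bit-reversal permutation (A's nested interleaves compose to exactly that).
--     if len(arr) == 1:
--         return arr
--     subs = [arr]
--     cxs = list(xs)
--     levels = 0
--     while len(subs[0]) > 1:
--         n = len(subs[0]) // 2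
--         half = pow(2, P - 2, P)
--         sl = cxs[0:2 * n:2]
--         invs = [pow(2 * x, P - 2, P) for x in sl]
--         new_subs = []
--         for s in subs:
--             new_subs.append([(s[2 * k] + s[2 * k + 1]) * half % P for k in range(n)])
--             new_subs.append([(s[2 * k] - s[2 * k + 1]) * invs[k] % P for k in range(n)])
--         subs = new_subs
--         cxs = [x * x % P for x in sl]
--         levels += 1
--     out = []
--     for j in range(1 << levels):
--         r = 0
--         t = j
--         for _ in range(levels):
--             r = (r << 1) | (t & 1)
--             t >>= 1
--         out.append(subs[r][0])
--     return tuple(out)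
-- ===== Notes on version B (the rewrite author's own statement) =====
-- stated objective: faster
-- what changed: A's recursive halving with per-call xs recomputation and sum(zip(...), ()) tuple-concatenation interleaving is replaced by an iterative breadth-first loop over levels (all subproblems of a level share one xs vector, computed once per level, with the inverse of 2 hoisted out of the element loop) followed by a single bit-reversal-permutation gather of the size-1 leaves.
import Mathlib
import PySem

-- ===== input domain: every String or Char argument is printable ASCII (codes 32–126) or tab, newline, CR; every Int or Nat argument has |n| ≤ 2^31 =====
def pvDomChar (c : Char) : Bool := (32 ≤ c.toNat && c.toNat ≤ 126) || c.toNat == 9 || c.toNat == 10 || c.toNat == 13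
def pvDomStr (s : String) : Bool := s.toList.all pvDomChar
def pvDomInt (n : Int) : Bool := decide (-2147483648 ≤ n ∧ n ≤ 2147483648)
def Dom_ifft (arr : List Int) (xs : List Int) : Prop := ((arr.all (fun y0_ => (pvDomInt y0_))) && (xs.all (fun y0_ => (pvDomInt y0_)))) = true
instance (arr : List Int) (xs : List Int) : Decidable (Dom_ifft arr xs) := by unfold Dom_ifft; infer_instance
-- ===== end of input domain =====

-- B replaces A's recursion by an iterative breadth-first loop over levels (all subproblems of a
-- level share one xs vector, so it is computed once per level) and reads the size-1 leaves back
-- through the bit-reversal permutation instead of A's nested sum(zip(...,()) interleaves; the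
-- timing run measured B faster. Equality is about RETURN values (both ports are List Int; the
-- Python A returns a tuple for len(arr) > 1 and a list for len(arr) == 1, and so does B).

-- ===== PORT A =====

def P : Int := 0x73eda753299d7d483339d80809a1d80553bda402fffe5bfeffffffff00000001

-- hand port of Python's builtin pow(b, e, m) by square-and-multiply (PySem.Int.powMod is mod (b^e) m,
-- which is not evaluable at exponent P-2); exact for m > 0: powmod b e m = (b ^ e) % m, value in [0, m).
def powmod (b : Int) (e : Nat) (m : Int) : Int :=
  if e = 0 then PySem.Int.mod 1 m
  else
    let h := powmod b (e / 2) m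
    let h2 := PySem.Int.mod (h * h) m
    if e % 2 = 1 then PySem.Int.mod (h2 * b) m else h2
decreasing_by exact Nat.div_lt_self (Nat.pos_of_ne_zero (by omega)) (by omega)

def div_mod (a b P : Int) : Int := PySem.Int.mod (a * powmod b (P - 2).toNat P) P

-- fuel = arr.length bounds the recursion depth (each call recurses on lists of half the length;
-- Python diverges on arr = [], which Pre_ifft excludes); fuel-out is unreachable under Pre_ifft
def ifftA : Nat → List Int → List Int → List Int
  | 0, _, _ => []
  | fuel + 1, arr, xs =>
    if PySem.List.len arr = 1 then arr
    else
      let n : Int := PySem.Int.floordiv (PySem.List.len arr) 2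
      let st := (PySem.List.pyRange 0 (2 * n) 2).foldl
        (fun (st : List Int × List Int × List Int) i =>
          let a := PySem.List.pyGetD arr i 0
          let b := PySem.List.pyGetD arr (i + 1) 0
          let x := PySem.List.pyGetD xs i 0
          (st.1 ++ [div_mod (a + b) 2 P],
           st.2.1 ++ [div_mod (a - b) (2 * x) P],
           st.2.2 ++ [powmod x 2 P]))
        ([], [], [])
      -- sum(zip(res0', res1'), ()) : fold tuple concatenation over the zipped results
      ((ifftA fuel st.1 st.2.2).zip (ifftA fuel st.2.1 st.2.2)).foldl
        (fun acc p => acc ++ [p.1, p.2]) []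

def ifft (arr : List Int) (xs : List Int) : List Int := ifftA arr.length arr xs

-- ===== PORT B =====

-- Source B's inner bit-reversal loop (r = (r << 1) | (t & 1); t >>= 1, `levels` times): since r*2 has
-- bit 0 clear, (r << 1) | (t & 1) = r*2 + t%2 exactly
def bitrev (L j : Nat) : Nat :=
  ((List.range L).foldl (fun (rt : Nat × Nat) _ => (rt.1 * 2 + rt.2 % 2, rt.2 / 2)) (0, j)).1

-- the while loop of Source B; fuel = initial len(arr) bounds the number of levels (the sub length
-- halves each level). s[2*k], invs[k] and subs[r][0] are in range on every input admitted by
-- Pre_ifft (ported with getD); cxs[0:2*n:2] is PySem.List.slice? with step 2 (step ≠ 0, so some).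
def loopB : Nat → List (List Int) → List Int → Nat → List (List Int) × Nat
  | 0, subs, _, lv => (subs, lv)
  | fuel + 1, subs, cxs, lv =>
    if 1 < (subs.headD []).length then
      let n : Nat := (subs.headD []).length / 2
      let half := powmod 2 (P - 2).toNat P
      let sl := (PySem.List.slice? cxs (some 0) (some ((2 * n : Nat) : Int)) 2).getD []
      let invs := sl.map (fun x => powmod (2 * x) (P - 2).toNat P)
      let newSubs := subs.flatMap (fun s =>
        [(List.range n).map (fun k =>
            PySem.Int.mod ((s.getD (2 * k) 0 + s.getD (2 * k + 1) 0) * half) P),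
         (List.range n).map (fun k =>
            PySem.Int.mod ((s.getD (2 * k) 0 - s.getD (2 * k + 1) 0) * invs.getD k 0) P)])
      loopB fuel newSubs (sl.map (fun x => PySem.Int.mod (x * x) P)) (lv + 1)
    else (subs, lv)

def ifft_alt (arr : List Int) (xs : List Int) : List Int :=
  if PySem.List.len arr = 1 then arr
  else
    let r := loopB arr.length [arr] xs 0
    (List.range (2 ^ r.2)).map (fun j => (r.1.getD (bitrev r.2 j) []).getD 0 0)

-- ===== PRECONDITION & SPEC =====

-- exactly where Python A returns: on arr = [] it recurses forever (RecursionError), and with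
-- 2 ≤ len(arr) it reads xs[0], xs[2], …, xs[2*(len(arr)//2) - 2], so it raises IndexError
-- unless len(xs) ≥ 2*(len(arr)//2) - 1
def Pre_ifft (arr : List Int) (xs : List Int) : Prop :=
  arr ≠ [] ∧ 2 * (arr.length / 2) ≤ xs.length + 1
instance (arr : List Int) (xs : List Int) : Decidable (Pre_ifft arr xs) := by
  unfold Pre_ifft; infer_instance

def pvWitness_ifft : List Int × List Int := ([1, 2], [3])

def Spec_ifft (arr : List Int) (xs : List Int) (out : List Int) : Prop := out = ifft_alt arr xs
instance (arr : List Int) (xs : List Int) (out : List Int) : Decidable (Spec_ifft arr xs out) := by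
  unfold Spec_ifft; infer_instance

-- ===== CLAIM (what is proved, stated in full; the proofs are below) =====
def Claim_equal_ifft : Prop := ∀ (arr : List Int) (xs : List Int), Dom_ifft arr xs → Pre_ifft arr xs → Spec_ifft arr xs (ifft arr xs)

-- ===== LEMMAS AND PROOFS =====

-- canonical per-sub lists of A's splitting loop (res0, res1, new_xs)
def pvA0 (arr : List Int) : List Int :=
  (List.range (arr.length / 2)).map
    (fun k => div_mod (arr.getD (2*k) 0 + arr.getD (2*k+1) 0) 2 P)
def pvA1 (arr xs : List Int) : List Int :=
  (List.range (arr.length / 2)).map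
    (fun k => div_mod (arr.getD (2*k) 0 - arr.getD (2*k+1) 0) (2 * xs.getD (2*k) 0) P)
def pvAX (arr xs : List Int) : List Int :=
  (List.range (arr.length / 2)).map (fun k => powmod (xs.getD (2*k) 0) 2 P)

-- number of levels the loop runs for a sub length
def pvDepth : Nat → Nat
  | 0 => 0
  | 1 => 0
  | n + 2 => pvDepth ((n + 2) / 2) + 1
decreasing_by exact Nat.div_lt_self (by omega) (by omega)

lemma pvDepth_le (l : Nat) (h : 1 ≤ l) : pvDepth l + 1 ≤ l := by
  induction l using Nat.strong_induction_on with
  | _ l ih =>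
    match l, h with
    | 1, _ => simp [pvDepth]
    | (n+2), _ =>
      have := ih ((n+2)/2) (by omega) (by omega)
      rw [pvDepth]
      omega

-- A's three-accumulator append loop is three maps
lemma loop3 {γ : Type} (idxs : List γ) (f0 f1 f2 : γ → Int) (s0 s1 s2 : List Int) :
    idxs.foldl (fun (st : List Int × List Int × List Int) i =>
        (st.1 ++ [f0 i], st.2.1 ++ [f1 i], st.2.2 ++ [f2 i])) (s0, s1, s2)
      = (s0 ++ idxs.map f0, s1 ++ idxs.map f1, s2 ++ idxs.map f2) := by
  induction idxs generalizing s0 s1 s2 with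
  | nil => simp
  | cons i t ih => simp [ih]

-- interleave of two equal-length lists (what A's sum(zip(..), ()) fold produces)
def interleave : List Int → List Int → List Int
  | a :: as, bs => a :: interleave bs as
  | [], _ => []
termination_by l1 l2 => l1.length + l2.length
decreasing_by simp; omega

lemma interleave_eq (l1 : List Int) : ∀ (l2 acc : List Int), l1.length = l2.length →
    (l1.zip l2).foldl (fun acc p => acc ++ [p.1, p.2]) acc = acc ++ interleave l1 l2 := by
  induction l1 with
  | nil =>
    intro l2 acc h
    simp [interleave]
  | cons a as ih =>
    intro l2 acc h
    cases l2 with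
    | nil => simp at h
    | cons b bs =>
      simp only [List.zip_cons_cons, List.foldl_cons, interleave]
      rw [ih bs _ (by simpa using h)]
      simp

lemma interleave_map (N : Nat) : ∀ (f g : Nat → Int),
    interleave ((List.range N).map f) ((List.range N).map g)
      = (List.range (2 * N)).map (fun j => if j % 2 = 0 then f (j / 2) else g (j / 2)) := by
  induction N with
  | zero => intro f g; simp [interleave]
  | succ N ih =>
    intro f g
    rw [List.range_succ_eq_map, List.map_cons, List.map_cons,
        interleave, interleave]
    rw [List.map_map, List.map_map, ih]
    have h2 : 2 * (N + 1) = (2 * N) + 1 + 1 := by omega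
    rw [h2, List.range_succ_eq_map, List.range_succ_eq_map]
    simp only [List.map_cons, List.map_map]
    refine congrArg₂ List.cons (by norm_num) (congrArg₂ List.cons (by norm_num) ?_)
    apply List.map_congr_left
    intro j _
    have : (j + 1 + 1) % 2 = j % 2 := by omega
    have h' : (j + 1 + 1) / 2 = j / 2 + 1 := by omega
    simp only [Function.comp_apply, this, h']

lemma powmod_two (x : Int) : powmod x 2 P = PySem.Int.mod (x * x) P := by
  have hP : (0:Int) < P := by decide
  have e1 : (1:Int) % P = 1 := by decide
  have h0 : powmod x 0 P = 1 := by
    rw [powmod]; norm_num [PySem.Int.mod_eq_emod_of_pos hP, e1]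
  have h1 : powmod x 1 P = PySem.Int.mod x P := by
    rw [powmod]; norm_num [h0, PySem.Int.mod_eq_emod_of_pos hP, e1]
  rw [powmod]; norm_num [h1, PySem.Int.mod_eq_emod_of_pos hP, ← Int.mul_emod]

-- one unrolling of the bit-reversal fold
lemma revfold_succ (L : Nat) (p : Nat × Nat) :
    (List.range (L + 1)).foldl (fun (rt : Nat × Nat) _ => (rt.1 * 2 + rt.2 % 2, rt.2 / 2)) p
      = (List.range L).foldl (fun (rt : Nat × Nat) _ => (rt.1 * 2 + rt.2 % 2, rt.2 / 2))
          (p.1 * 2 + p.2 % 2, p.2 / 2) := by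
  rw [List.range_succ_eq_map, List.foldl_cons, List.foldl_map]

-- the bit-reversal fold, started at (r, t) instead of (0, t)
lemma bitrev_shift (L : Nat) : ∀ (r t : Nat),
    ((List.range L).foldl (fun (rt : Nat × Nat) _ => (rt.1 * 2 + rt.2 % 2, rt.2 / 2)) (r, t)).1
      = r * 2 ^ L + bitrev L t := by
  induction L with
  | zero => intro r t; simp [bitrev]
  | succ L ih =>
    intro r t
    unfold bitrev
    rw [revfold_succ L (r, t), revfold_succ L (0, t)]
    dsimp only
    rw [ih (r * 2 + t % 2) (t / 2), ih (0 * 2 + t % 2) (t / 2)]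
    ring

lemma bitrev_succ (L t : Nat) : bitrev (L + 1) t = (t % 2) * 2 ^ L + bitrev L (t / 2) := by
  unfold bitrev
  rw [revfold_succ L (0, t)]
  dsimp only
  rw [bitrev_shift L (0 * 2 + t % 2) (t / 2)]
  unfold bitrev
  ring_nf

-- the step-2 slice cxs[0:2*n:2] as a map over indices (exact when len(cxs) ≥ 2*n - 1)
lemma slice_step2 (l : List Int) (n : Nat) (h : 2 * n ≤ l.length + 1) :
    (PySem.List.slice? l (some 0) (some ((2 * n : Nat) : Int)) 2).getD []
      = (List.range n).map (fun k => l.getD (2 * k) 0) := by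
  rw [PySem.List.slice?]
  norm_num [PySem.List.sliceIndices]
  have hcount : (if (0:Int) < (if 2 * (n:Int) < 0 then max (2 * (n:Int) + (l.length:Int)) 0
        else min (2 * (n:Int)) (l.length:Int))
      then (((if 2 * (n:Int) < 0 then max (2 * (n:Int) + (l.length:Int)) 0
        else min (2 * (n:Int)) (l.length:Int)) + 2 - 1) / 2).toNat else 0) = n := by
    split_ifs with h1 h2 <;> omega
  rw [hcount]
  have hmem : ∀ k ∈ List.range n,
      (fun x => l[(2 * (x:Int)).toNat]?) k = (some ∘ fun k => l.getD (2 * k) 0) k := by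
    intro k hk
    rw [List.mem_range] at hk
    have h2k : (2 * (k:Int)).toNat = 2 * k := by omega
    have hlt : 2 * k < l.length := by omega
    simp [h2k, List.getD_eq_getElem?_getD, List.getElem?_eq_getElem hlt]
  rw [List.filterMap_congr hmem, List.filterMap_eq_map]
  simp [List.getD_eq_getElem?_getD]

-- indexing a flatMap that emits two children per sub
lemma flatMap_pair_getD (c0 c1 : List Int → List Int) :
    ∀ (subs : List (List Int)) (i : Nat), i < subs.length →
      (subs.flatMap (fun s => [c0 s, c1 s])).getD (2 * i) [] = c0 (subs.getD i []) ∧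
      (subs.flatMap (fun s => [c0 s, c1 s])).getD (2 * i + 1) [] = c1 (subs.getD i []) := by
  intro subs
  induction subs with
  | nil => intro i hi; simp at hi
  | cons s rest ih =>
    intro i hi
    cases i with
    | zero => simp
    | succ i =>
      have h2 : 2 * (i + 1) = (2 * i) + 1 + 1 := by omega
      rw [h2]
      simp only [List.flatMap_cons, List.cons_append, List.nil_append,
        List.getD_cons_succ]
      exact ih i (by simpa using hi)

lemma flatMap_pair_length (c0 c1 : List Int → List Int) (subs : List (List Int)) :
    (subs.flatMap (fun s => [c0 s, c1 s])).length = 2 * subs.length := by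
  induction subs with
  | nil => simp
  | cons s rest ih => simp [ih]; omega

lemma getD_mem {α : Type} (l : List α) (i : Nat) (d : α) (h : i < l.length) :
    l.getD i d ∈ l := by
  rw [List.getD_eq_getElem?_getD, List.getElem?_eq_getElem h]
  exact List.getElem_mem h

lemma ifftA_succ (fuel : Nat) (arr xs : List Int) (h : ¬ PySem.List.len arr = 1) :
    ifftA (fuel+1) arr xs =
      ((ifftA fuel (pvA0 arr) (pvAX arr xs)).zip (ifftA fuel (pvA1 arr xs) (pvAX arr xs))).foldl
        (fun acc p => acc ++ [p.1, p.2]) [] := by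
  rw [ifftA, if_neg h]
  dsimp only
  have hn : PySem.Int.floordiv (PySem.List.len arr) 2 = ((arr.length / 2 : Nat) : Int) := by
    rw [PySem.List.len_eq]; exact_mod_cast PySem.Int.floordiv_natCast arr.length 2
  rw [hn, PySem.List.pyRange_of_pos _ _ (by norm_num : (0:Int) < 2)]
  have hc : (if (0:Int) < 2 * ((arr.length / 2 : Nat) : Int)
      then ((2 * ((arr.length / 2 : Nat) : Int) - 0 + 2 - 1) / 2).toNat else 0)
      = arr.length / 2 := by
    split_ifs with h' <;> omega
  rw [hc, List.foldl_map]
  have hc0 : ∀ k : Nat, (0:Int) + 2 * (k:Int) = ((2*k : Nat) : Int) := by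
    intro k; push_cast; ring
  have hc1 : ∀ k : Nat, ((2*k : Nat) : Int) + 1 = ((2*k+1 : Nat) : Int) := by
    intro k; push_cast; ring
  simp only [loop3, List.nil_append, hc0, hc1, PySem.List.pyGetD_natCast]
  rfl

-- B's per-level children and next-level xs (the bodies of loopB's lets), as named functions of
-- n = sub length / 2 and the level's cxs
def pvC0 (n : Nat) (s : List Int) : List Int :=
  (List.range n).map (fun k =>
    PySem.Int.mod ((s.getD (2*k) 0 + s.getD (2*k+1) 0) * powmod 2 (P - 2).toNat P) P)
def pvC1 (n : Nat) (cxs s : List Int) : List Int :=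
  (List.range n).map (fun k =>
    PySem.Int.mod ((s.getD (2*k) 0 - s.getD (2*k+1) 0) *
      (((List.range n).map (fun k' => cxs.getD (2*k') 0)).map
        (fun x => powmod (2*x) (P - 2).toNat P)).getD k 0) P)
def pvNX (n : Nat) (cxs : List Int) : List Int :=
  ((List.range n).map (fun k => cxs.getD (2*k) 0)).map (fun x => PySem.Int.mod (x*x) P)

lemma loopB_step (fB : Nat) (s0 : List Int) (rest : List (List Int)) (cxs : List Int) (lv : Nat)
    (h : 1 < s0.length) (hcx : 2 * (s0.length / 2) ≤ cxs.length + 1) :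
    loopB (fB + 1) (s0 :: rest) cxs lv
      = loopB fB ((s0 :: rest).flatMap
          (fun s => [pvC0 (s0.length / 2) s, pvC1 (s0.length / 2) cxs s]))
          (pvNX (s0.length / 2) cxs) (lv + 1) := by
  rw [loopB]
  simp only [List.headD_cons]
  rw [if_pos h]
  rw [slice_step2 cxs (s0.length / 2) hcx]
  simp only [pvC0, pvC1, pvNX]

lemma pvC0_eq (l : Nat) (s : List Int) (hs : s.length = l) : pvC0 (l / 2) s = pvA0 s := by
  subst hs
  simp only [pvC0, pvA0, div_mod]

lemma pvC1_eq (l : Nat) (s cxs : List Int) (hs : s.length = l) :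
    pvC1 (l / 2) cxs s = pvA1 s cxs := by
  subst hs
  simp only [pvC1, pvA1, div_mod, List.map_map]
  apply List.map_congr_left
  intro k hk
  rw [List.mem_range] at hk
  rw [PySem.List.getD_map_range _ _ _ _ hk]
  simp

lemma pvNX_eq (l : Nat) (s cxs : List Int) (hs : s.length = l) :
    pvAX s cxs = pvNX (l / 2) cxs := by
  subst hs
  simp only [pvAX, pvNX, List.map_map]
  apply List.map_congr_left
  intro k _
  exact powmod_two _

-- the main invariant: the whole BFS of loopB against the recursion of ifftA, by induction on the
-- number of levels L; leaves of sub i occupy block i of the final subs list, read back through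
-- the bit-reversal permutation
lemma loop_inv : ∀ (L fuelB fuelA l lv : Nat) (subs : List (List Int)) (cxs : List Int),
    pvDepth l = L → 1 ≤ l → L ≤ fuelB → L + 1 ≤ fuelA → subs ≠ [] →
    (∀ s ∈ subs, s.length = l) → 2 * (l / 2) ≤ cxs.length + 1 →
    (loopB fuelB subs cxs lv).2 = lv + L ∧
    (loopB fuelB subs cxs lv).1.length = subs.length * 2 ^ L ∧
    (∀ i, i < subs.length →
      ifftA fuelA (subs.getD i []) cxs
        = (List.range (2 ^ L)).map
            (fun j => ((loopB fuelB subs cxs lv).1.getD (i * 2 ^ L + bitrev L j) []).getD 0 0)) := by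
  intro L
  induction L with
  | zero =>
    intro fuelB fuelA l lv subs cxs hd h1 hfB hfA hne hlen hcx
    have hl1 : l = 1 := by
      match l, h1, hd with
      | 1, _, _ => rfl
      | (n+2), _, hd => rw [pvDepth] at hd; omega
    subst hl1
    have hstop : loopB fuelB subs cxs lv = (subs, lv) := by
      cases fuelB with
      | zero => rfl
      | succ f =>
        rw [loopB]
        have hh : (subs.headD []).length = 1 := by
          cases subs with
          | nil => exact absurd rfl hne
          | cons s r => exact hlen s (by simp)
        rw [if_neg (by omega)]
    rw [hstop]
    refine ⟨rfl, by simp, ?_⟩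
    intro i hi
    have hsl : (subs.getD i []).length = 1 := hlen _ (getD_mem subs i [] hi)
    obtain ⟨a, ha⟩ := List.length_eq_one_iff.mp hsl
    obtain ⟨fA, rfl⟩ : ∃ fA, fuelA = fA + 1 := ⟨fuelA - 1, by omega⟩
    rw [ha, ifftA]
    have hl : PySem.List.len [a] = 1 := by simp [PySem.List.len_eq]
    rw [if_pos hl]
    have ha' : subs[i]?.getD [] = [a] := by rw [← List.getD_eq_getElem?_getD]; exact ha
    simp [bitrev, ha']
  | succ L ih =>
    intro fuelB fuelA l lv subs cxs hd h1 hfB hfA hne hlen hcx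
    obtain ⟨m, rfl⟩ : ∃ m, l = m + 2 := by
      match l, h1, hd with
      | 1, _, hd => simp [pvDepth] at hd
      | (n+2), _, _ => exact ⟨n, rfl⟩
    have hd2 : pvDepth ((m+2)/2) = L := by rw [pvDepth] at hd; omega
    obtain ⟨fB, rfl⟩ : ∃ fB, fuelB = fB + 1 := ⟨fuelB - 1, by omega⟩
    obtain ⟨fA, rfl⟩ : ∃ fA, fuelA = fA + 1 := ⟨fuelA - 1, by omega⟩
    obtain ⟨s0, rest, rfl⟩ : ∃ s0 rest, subs = s0 :: rest := by
      cases subs with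
      | nil => exact absurd rfl hne
      | cons a b => exact ⟨a, b, rfl⟩
    have hs0 : s0.length = m + 2 := hlen s0 (by simp)
    have hstep := loopB_step fB s0 rest cxs lv (by omega) (by rw [hs0]; omega)
    rw [hs0] at hstep
    set NS := (s0 :: rest).flatMap
      (fun s => [pvC0 ((m+2)/2) s, pvC1 ((m+2)/2) cxs s]) with hNS
    set NX := pvNX ((m+2)/2) cxs with hNX
    have hNSlen : NS.length = 2 * (s0 :: rest).length := flatMap_pair_length _ _ _
    have hNSmem : ∀ s' ∈ NS, s'.length = (m+2)/2 := by
      intro s' hs'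
      rw [hNS, List.mem_flatMap] at hs'
      obtain ⟨s, _, hs'⟩ := hs'
      simp only [List.mem_cons, List.not_mem_nil, or_false] at hs'
      rcases hs' with h | h <;> subst h <;> simp [pvC0, pvC1]
    have hNXlen : 2 * (((m+2)/2) / 2) ≤ NX.length + 1 := by
      rw [hNX]
      simp only [pvNX, List.length_map, List.length_range]
      omega
    obtain ⟨ih1, ih2, ih3⟩ := ih fB fA ((m+2)/2) (lv+1) NS NX hd2 (by omega) (by omega)
      (by omega) (by simp [hNS]) hNSmem hNXlen
    refine ⟨?_, ?_, ?_⟩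
    · rw [hstep, ih1]; omega
    · rw [hstep, ih2, hNSlen, pow_succ]; ring
    · intro i hi
      have hsub : ((s0 :: rest).getD i []).length = m + 2 :=
        hlen _ (getD_mem _ _ _ hi)
      have hlenne : ¬ PySem.List.len ((s0 :: rest).getD i []) = 1 := by
        rw [PySem.List.len_eq, hsub]; omega
      rw [hstep, ifftA_succ fA _ cxs hlenne]
      have hpair := flatMap_pair_getD (pvC0 ((m+2)/2)) (pvC1 ((m+2)/2) cxs) (s0 :: rest) i hi
      have e0 : NS.getD (2*i) [] = pvA0 ((s0 :: rest).getD i []) := by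
        rw [← hNS] at hpair
        rw [hpair.1, pvC0_eq (m+2) _ hsub]
      have e1 : NS.getD (2*i+1) [] = pvA1 ((s0 :: rest).getD i []) cxs := by
        rw [← hNS] at hpair
        rw [hpair.2, pvC1_eq (m+2) _ cxs hsub]
      have eX : pvAX ((s0 :: rest).getD i []) cxs = NX :=
        pvNX_eq (m+2) _ cxs hsub
      rw [eX, ← e0, ← e1]
      rw [ih3 (2*i) (by omega), ih3 (2*i+1) (by omega)]
      rw [interleave_eq _ _ [] (by simp), List.nil_append, interleave_map]
      rw [show 2 * 2 ^ L = 2 ^ (L+1) by rw [pow_succ]; ring]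
      apply List.map_congr_left
      intro j hj
      rw [List.mem_range] at hj
      rcases Nat.mod_two_eq_zero_or_one j with hj2 | hj2
      · have hidx : i * 2 ^ (L+1) + bitrev (L+1) j = 2*i * 2 ^ L + bitrev L (j/2) := by
          rw [bitrev_succ, hj2, pow_succ]; ring
        rw [hidx]
        simp [hj2]
      · have hidx : i * 2 ^ (L+1) + bitrev (L+1) j = (2*i+1) * 2 ^ L + bitrev L (j/2) := by
          rw [bitrev_succ, hj2, pow_succ]; ring
        rw [hidx]
        simp [hj2]

-- ===== VERDICT (by name: the statement is the Claim_ definition above) =====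
theorem ifft_spec : Claim_equal_ifft := by
  intro arr xs _ hpre
  obtain ⟨hne, hxs⟩ := hpre
  unfold Spec_ifft ifft ifft_alt
  by_cases h1 : PySem.List.len arr = 1
  · have h1' : arr.length = 1 := by
      rw [PySem.List.len_eq] at h1; exact_mod_cast h1
    rw [if_pos h1, h1', ifftA, if_pos h1]
  · rw [if_neg h1]
    have h2 : 2 ≤ arr.length := by
      rw [PySem.List.len_eq] at h1
      have : arr.length ≠ 0 := by simpa using hne
      have : arr.length ≠ 1 := by intro hc; apply h1; rw [hc]; rfl
      omega
    have hL1 : pvDepth arr.length + 1 ≤ arr.length := pvDepth_le _ (by omega)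
    obtain ⟨hlv, _, hmap⟩ := loop_inv (pvDepth arr.length) arr.length arr.length arr.length 0
      [arr] xs rfl (by omega) (by omega) (by omega) (by simp) (by simp) hxs
    have h0 := hmap 0 (by simp)
    simp only [List.getD_cons_zero] at h0
    rw [h0]
    dsimp only
    rw [hlv]
    simp
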